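-- pv_equiv track=rewrite | github.com/Munazir151/MediVoice | backend/app/services/drug_database.py | _should_filter_medicine
-- ===== SOURCE A (Python) =====
-- def _should_filter_medicine(
--
--     medicine_name: str,
--     age: int | None = None,
--     is_pregnant: bool = False,
--     chronic_conditions: list[str] | None = None,
--     allergies: list[str] | None = None,
-- ) -> bool:
--     """Check if medicine should be filtered out based on patient health profile."""
--     if not medicine_name:
--         return False
--
--     name_lower = medicine_name.lower()
--     conditions = chronic_conditions or []
--     allergies_list = allergies or []
--
--     if is_pregnant:
--         unsafe_in_pregnancy = ['ibuprofen', 'naproxen', 'aspirin', 'dextromethorphan', 'loperamide']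
--         if any(unsafe in name_lower for unsafe in unsafe_in_pregnancy):
--             return True
--
--     if age and age < 12:
--         unsafe_for_children = ['ibuprofen', 'naproxen']
--         if any(drug in name_lower for drug in unsafe_for_children):
--             return True
--
--     if age and age > 65:
--         extra_caution = ['ibuprofen', 'naproxen']
--         if any(drug in name_lower for drug in extra_caution):
--             return True
--
--     if 'Kidney Disease' in conditions or 'Renal' in conditions:
--         avoid_kidney = ['ibuprofen', 'naproxen', 'acetaminophen (high doses)']
--         if any(drug in name_lower for drug in avoid_kidney):
--             return True
--
--     if 'Stomach Upset' in conditions or any('ulcer' in c.lower() for c in conditions):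
--         avoid_stomach = ['ibuprofen', 'naproxen', 'aspirin']
--         if any(drug in name_lower for drug in avoid_stomach):
--             return True
--
--     if 'Heart Disease' in conditions:
--         caution_heart = ['ibuprofen', 'naproxen']
--         if any(drug in name_lower for drug in caution_heart):
--             return True
--
--     for allergy in allergies_list:
--         if allergy.lower() in name_lower:
--             return True
--
--     return False
-- ===== SOURCE B (Python) =====
-- def _should_filter_medicine(
--     medicine_name: str,
--     age: int | None = None,
--     is_pregnant: bool = False,
--     chronic_conditions: list[str] | None = None,
--     allergies: list[str] | None = None,
-- ) -> bool:
--     """Drug-centric: evaluate the risk flags once, then scan a table of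
--     (hazardous substring, flags that ban it) and flag the medicine iff some
--     listed substring occurs in the name while one of its flags is active."""
--     if not medicine_name:
--         return False
--
--     name_lower = medicine_name.lower()
--     conditions = chronic_conditions or []
--
--     preg = is_pregnant
--     child = bool(age) and age < 12
--     senior = bool(age) and age > 65
--     kidney = 'Kidney Disease' in conditions or 'Renal' in conditions
--     stomach = 'Stomach Upset' in conditions or any('ulcer' in c.lower() for c in conditions)
--     heart = 'Heart Disease' in conditions
--
--     drug_table = [
--         ('ibuprofen', [preg, child, senior, kidney, stomach, heart]),
--         ('naproxen', [preg, child, senior, kidney, stomach, heart]),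
--         ('aspirin', [preg, stomach]),
--         ('dextromethorphan', [preg]),
--         ('loperamide', [preg]),
--         ('acetaminophen (high doses)', [kidney]),
--     ]
--     if any(drug in name_lower and any(flags) for drug, flags in drug_table):
--         return True
--     return any(a.lower() in name_lower for a in (allergies or []))
-- ===== Notes on version B (the rewrite author's own statement) =====
-- stated objective: alternative
-- what changed: Transposes the logic: instead of A's six rule-centric guard blocks each scanning its own drug list and returning early, B evaluates the six patient risk flags once and then makes a single pass over a drug table mapping each hazardous substring to the flags that ban it, filtering iff some present substring has an active flag (allergies scanned last as in A).
import Mathlib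
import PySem

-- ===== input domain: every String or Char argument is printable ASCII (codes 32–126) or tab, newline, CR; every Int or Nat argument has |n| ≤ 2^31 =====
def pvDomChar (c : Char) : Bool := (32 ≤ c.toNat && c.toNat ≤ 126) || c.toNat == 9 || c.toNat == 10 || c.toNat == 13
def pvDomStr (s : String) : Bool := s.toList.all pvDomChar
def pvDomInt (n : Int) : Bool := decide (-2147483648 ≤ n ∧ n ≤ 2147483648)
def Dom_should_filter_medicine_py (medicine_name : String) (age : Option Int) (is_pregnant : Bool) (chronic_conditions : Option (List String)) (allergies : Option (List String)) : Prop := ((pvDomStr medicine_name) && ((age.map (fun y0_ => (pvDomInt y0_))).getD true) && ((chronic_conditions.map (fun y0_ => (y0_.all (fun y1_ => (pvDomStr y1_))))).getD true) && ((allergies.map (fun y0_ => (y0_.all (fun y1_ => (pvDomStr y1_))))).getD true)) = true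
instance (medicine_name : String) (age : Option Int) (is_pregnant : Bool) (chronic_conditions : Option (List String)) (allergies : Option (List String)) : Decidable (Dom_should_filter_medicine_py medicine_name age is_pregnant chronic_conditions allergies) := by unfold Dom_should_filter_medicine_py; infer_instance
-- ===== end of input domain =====

-- B transposes A's rule-centric guard blocks into a drug-centric table scan:
-- risk flags are evaluated once, then one pass over (drug substring, banning flags) decides (objective: alternative).

-- ===== PORT A =====
def should_filter_medicine_py (medicine_name : String) (age : Option Int) (is_pregnant : Bool) (chronic_conditions : Option (List String)) (allergies : Option (List String)) : Bool :=
  if medicine_name == "" then false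
  else
    let name_lower := PySem.Str.lower medicine_name
    let conditions := chronic_conditions.getD []
    let allergies_list := allergies.getD []
    -- each Python 'if guard: ... if any(...): return True' block becomes 'guard && any(...) then true else <rest>'
    if is_pregnant && (["ibuprofen", "naproxen", "aspirin", "dextromethorphan", "loperamide"].any (fun danger => PySem.Str.isIn danger name_lower)) then true
    else if (match age with | none => false | some a => decide (a ≠ 0) && decide (a < 12)) && (["ibuprofen", "naproxen"].any (fun drug => PySem.Str.isIn drug name_lower)) then true
    else if (match age with | none => false | some a => decide (a ≠ 0) && decide (a > 65)) && (["ibuprofen", "naproxen"].any (fun drug => PySem.Str.isIn drug name_lower)) then true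
    else if (conditions.contains "Kidney Disease" || conditions.contains "Renal") && (["ibuprofen", "naproxen", "acetaminophen (high doses)"].any (fun drug => PySem.Str.isIn drug name_lower)) then true
    else if (conditions.contains "Stomach Upset" || conditions.any (fun c => PySem.Str.isIn "ulcer" (PySem.Str.lower c))) && (["ibuprofen", "naproxen", "aspirin"].any (fun drug => PySem.Str.isIn drug name_lower)) then true
    else if (conditions.contains "Heart Disease") && (["ibuprofen", "naproxen"].any (fun drug => PySem.Str.isIn drug name_lower)) then true
    else allergies_list.any (fun allergy => PySem.Str.isIn (PySem.Str.lower allergy) name_lower)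

-- ===== PORT B =====
def should_filter_medicine_py_alt (medicine_name : String) (age : Option Int) (is_pregnant : Bool) (chronic_conditions : Option (List String)) (allergies : Option (List String)) : Bool :=
  if medicine_name == "" then false
  else
    let name_lower := PySem.Str.lower medicine_name
    let conditions := chronic_conditions.getD []
    let preg := is_pregnant
    let child := match age with | none => false | some a => decide (a ≠ 0) && decide (a < 12)
    let senior := match age with | none => false | some a => decide (a ≠ 0) && decide (a > 65)
    let kidney := conditions.contains "Kidney Disease" || conditions.contains "Renal"
    let stomach := conditions.contains "Stomach Upset" || conditions.any (fun c => PySem.Str.isIn "ulcer" (PySem.Str.lower c))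
    let heart := conditions.contains "Heart Disease"
    let drug_table : List (String × List Bool) :=
      [("ibuprofen", [preg, child, senior, kidney, stomach, heart]),
       ("naproxen", [preg, child, senior, kidney, stomach, heart]),
       ("aspirin", [preg, stomach]),
       ("dextromethorphan", [preg]),
       ("loperamide", [preg]),
       ("acetaminophen (high doses)", [kidney])]
    if drug_table.any (fun row => PySem.Str.isIn row.1 name_lower && row.2.any id) then true
    else (allergies.getD []).any (fun a => PySem.Str.isIn (PySem.Str.lower a) name_lower)

-- ===== PRECONDITION & SPEC =====
def Spec_should_filter_medicine_py (medicine_name : String) (age : Option Int) (is_pregnant : Bool) (chronic_conditions : Option (List String)) (allergies : Option (List String)) (out : Bool) : Prop := out = should_filter_medicine_py_alt medicine_name age is_pregnant chronic_conditions allergies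
instance (medicine_name : String) (age : Option Int) (is_pregnant : Bool) (chronic_conditions : Option (List String)) (allergies : Option (List String)) (out : Bool) : Decidable (Spec_should_filter_medicine_py medicine_name age is_pregnant chronic_conditions allergies out) := by unfold Spec_should_filter_medicine_py; infer_instance

-- ===== CLAIM (what is proved, stated in full; the proofs are below) =====
def Claim_equal_should_filter_medicine_py : Prop := ∀ (medicine_name : String) (age : Option Int) (is_pregnant : Bool) (chronic_conditions : Option (List String)) (allergies : Option (List String)), Dom_should_filter_medicine_py medicine_name age is_pregnant chronic_conditions allergies → Spec_should_filter_medicine_py medicine_name age is_pregnant chronic_conditions allergies (should_filter_medicine_py medicine_name age is_pregnant chronic_conditions allergies)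

-- ===== LEMMAS AND PROOFS =====
-- the pure boolean core: A's rule-centric if-chain equals B's drug-centric disjunction,
-- proved by exhausting the 13 atomic booleans after generalizing the string tests away.

-- ===== VERDICT (by name: the statement is the Claim_ definition above) =====
theorem should_filter_medicine_py_spec : Claim_equal_should_filter_medicine_py := by
  intro medicine_name age is_pregnant chronic_conditions allergies hdom
  clear hdom
  unfold Spec_should_filter_medicine_py should_filter_medicine_py should_filter_medicine_py_alt
  by_cases h : (medicine_name == "") = true
  · simp [h]
  · simp only [h, List.any_cons, List.any_nil, Bool.or_false, id, Bool.false_eq_true, if_false]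
    generalize PySem.Str.isIn "ibuprofen" (PySem.Str.lower medicine_name) = I
    generalize PySem.Str.isIn "naproxen" (PySem.Str.lower medicine_name) = N
    generalize PySem.Str.isIn "aspirin" (PySem.Str.lower medicine_name) = Asp
    generalize PySem.Str.isIn "dextromethorphan" (PySem.Str.lower medicine_name) = D
    generalize PySem.Str.isIn "loperamide" (PySem.Str.lower medicine_name) = L
    generalize PySem.Str.isIn "acetaminophen (high doses)" (PySem.Str.lower medicine_name) = Ace
    generalize (match age with | none => false | some a => decide (a ≠ 0) && decide (a < 12)) = child
    generalize (match age with | none => false | some a => decide (a ≠ 0) && decide (a > 65)) = senior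
    generalize ((chronic_conditions.getD []).contains "Kidney Disease" || (chronic_conditions.getD []).contains "Renal") = kidney
    generalize ((chronic_conditions.getD []).contains "Stomach Upset" || (chronic_conditions.getD []).any (fun c => PySem.Str.isIn "ulcer" (PySem.Str.lower c))) = stomach
    generalize (chronic_conditions.getD []).contains "Heart Disease" = heart
    generalize ((allergies.getD []).any (fun a => PySem.Str.isIn (PySem.Str.lower a) (PySem.Str.lower medicine_name))) = Alg
    revert Alg Ace L D Asp N I heart stomach kidney senior child is_pregnant
    decide
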